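-- pv_equiv track=rewrite | github.com/2Flaw3d/PokeInfoTools | scripts/build_site_data.py | iter_group_paths
-- ===== SOURCE A (Python) =====
-- def iter_group_paths(parts: list[str]) -> list[str]:
--     candidates: list[str] = []
--
--     def helper(start: int, groups_left: int, acc: list[str]) -> None:
--         if start == len(parts):
--             candidates.append("/".join(acc))
--             return
--         if groups_left == 0:
--             return
--         for end in range(start + 1, len(parts) + 1):
--             acc.append("_".join(parts[start:end]))
--             helper(end, groups_left - 1, acc)
--             acc.pop()
--
--     for group_count in (1, 2, 3):
--         helper(0, group_count, [])
--
--     deduped: list[str] = []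
--     seen: set[str] = set()
--     for candidate in candidates:
--         if candidate not in seen:
--             seen.add(candidate)
--             deduped.append(candidate)
--     return deduped
-- ===== SOURCE B (Python) =====
-- def iter_group_paths(parts: list[str]) -> list[str]:
--     n = len(parts)
--     # All ways to cut parts into 1, 2 or 3 contiguous groups, in A's emission order:
--     # the full join first, then the 2-group cuts, then the 3-group cuts in lex order.
--     groupings: list[list[list[str]]] = [[parts]]
--     for i in range(1, n):
--         groupings.append([parts[:i], parts[i:]])
--     for i in range(1, n):
--         for j in range(i + 1, n):
--             groupings.append([parts[:i], parts[i:j], parts[j:]])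
--     out: list[str] = []
--     seen: set[str] = set()
--     for groups in groupings:
--         cand = "/".join("_".join(g) for g in groups)
--         if cand not in seen:
--             seen.add(cand)
--             out.append(cand)
--     return out
-- ===== Notes on version B (the rewrite author's own statement) =====
-- stated objective: simpler
-- what changed: Replaced A's backtracking recursion (helper with mutable acc, run three times for group counts 1/2/3, which re-emits the 1- and 2-group candidates as duplicates) by direct iteration: emit the full join, then every 2-group cut, then every 3-group cut in lex order, deduplicating on emission.
import Mathlib
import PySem

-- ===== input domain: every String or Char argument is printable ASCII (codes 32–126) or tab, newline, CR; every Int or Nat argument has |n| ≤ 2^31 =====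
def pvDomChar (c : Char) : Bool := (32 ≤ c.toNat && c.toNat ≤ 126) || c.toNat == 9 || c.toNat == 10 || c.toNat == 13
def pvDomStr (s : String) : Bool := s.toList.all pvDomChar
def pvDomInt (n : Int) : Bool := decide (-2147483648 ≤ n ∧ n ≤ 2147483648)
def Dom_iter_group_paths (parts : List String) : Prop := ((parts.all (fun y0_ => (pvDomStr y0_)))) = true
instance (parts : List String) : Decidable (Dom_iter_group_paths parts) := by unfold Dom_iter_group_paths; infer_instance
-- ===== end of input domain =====

-- B replaces A's backtracking recursion (run three times, re-emitting smaller groupings as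
-- duplicates) by direct iteration over the full join, the 2-group cuts and the 3-group cuts,
-- deduplicating on emission; objective: simpler.

-- ===== PORT A =====
-- helper(start, groups_left, acc): net effect of acc.append / recurse / acc.pop is a call with
-- acc ++ [elem]; the append-only `candidates` list is the returned list. Slices parts[start:end]
-- with 0 ≤ start ≤ end are exactly (parts.drop start).take (end - start); range(start+1, len+1)
-- is List.range' (start+1) (parts.length - start).
def pvHelperA (parts : List String) : Nat → Nat → List String → List String
  | gl, start, acc =>
    if start = parts.length then [PySem.Str.join "/" acc]
    else
      match gl with
      | 0 => []
      | g + 1 =>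
        (List.range' (start + 1) (parts.length - start)).flatMap
          (fun e => pvHelperA parts g e (acc ++ [PySem.Str.join "_" ((parts.drop start).take (e - start))]))

def iter_group_paths (parts : List String) : List String :=
  let candidates := [1, 2, 3].flatMap (fun k => pvHelperA parts k 0 [])
  (candidates.foldl
    (fun (st : PySem.Set String × List String) c =>
      if PySem.Set.contains st.1 c then st else (PySem.Set.add st.1 c, st.2 ++ [c]))
    ((PySem.Set.empty : PySem.Set String), ([] : List String))).2

-- ===== PORT B =====
-- Source B: build the groupings list (full, 2-group cuts, 3-group cuts), then one dedup-on-emission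
-- pass; range(1, n) is List.range' 1 (n - 1), range(i+1, n) is List.range' (i+1) (n - (i+1)).
def iter_group_paths_alt (parts : List String) : List String :=
  let n := parts.length
  let groupings : List (List (List String)) :=
    [[parts]]
    ++ (List.range' 1 (n - 1)).map (fun i => [parts.take i, parts.drop i])
    ++ (List.range' 1 (n - 1)).flatMap (fun i =>
         (List.range' (i + 1) (n - (i + 1))).map
           (fun j => [parts.take i, (parts.drop i).take (j - i), parts.drop j]))
  (groupings.foldl
    (fun (st : PySem.Set String × List String) gs =>
      let cand := PySem.Str.join "/" (gs.map (fun g => PySem.Str.join "_" g))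
      if PySem.Set.contains st.1 cand then st else (PySem.Set.add st.1 cand, st.2 ++ [cand]))
    ((PySem.Set.empty : PySem.Set String), ([] : List String))).2

-- ===== PRECONDITION & SPEC =====
def Spec_iter_group_paths (parts : List String) (out : List String) : Prop := out = iter_group_paths_alt parts
instance (parts : List String) (out : List String) : Decidable (Spec_iter_group_paths parts out) := by unfold Spec_iter_group_paths; infer_instance

-- ===== CLAIM (what is proved, stated in full; the proofs are below) =====
def Claim_equal_iter_group_paths : Prop := ∀ (parts : List String), Dom_iter_group_paths parts → Spec_iter_group_paths parts (iter_group_paths parts)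

-- ===== LEMMAS AND PROOFS =====

-- the dedup-emission step shared (semantically) by both ports
def pvEmit (st : PySem.Set String × List String) (c : String) : PySem.Set String × List String :=
  if PySem.Set.contains st.1 c then st else (PySem.Set.add st.1 c, st.2 ++ [c])

def pvInit : PySem.Set String × List String := ((PySem.Set.empty : PySem.Set String), ([] : List String))

def pvRun (st : PySem.Set String × List String) (l : List String) : PySem.Set String × List String :=
  l.foldl pvEmit st

def pvJ (acc : List String) : String := PySem.Str.join "/" acc

def pvG (parts : List String) (s e : Nat) : String :=
  PySem.Str.join "_" ((parts.drop s).take (e - s))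

theorem pvEmit_of_mem {st : PySem.Set String × List String} {c : String} (h : c ∈ st.1) :
    pvEmit st c = st := by
  unfold pvEmit
  split
  · rfl
  · rename_i hc; exact absurd ((PySem.Set.contains_iff st.1 c).2 h) hc

theorem pvEmit_mem_fst {st : PySem.Set String × List String} {c x : String}
    (h : x ∈ st.1 ∨ x = c) : x ∈ (pvEmit st c).1 := by
  unfold pvEmit
  split
  · rename_i hc
    rcases h with h | rfl
    · exact h
    · exact (PySem.Set.contains_iff st.1 x).1 hc
  · simpa [PySem.Set.mem_add] using h

theorem pvRun_append (st : PySem.Set String × List String) (l1 l2 : List String) :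
    pvRun st (l1 ++ l2) = pvRun (pvRun st l1) l2 := by
  simp [pvRun, List.foldl_append]

theorem pvRun_mono {x : String} :
    ∀ (l : List String) (st : PySem.Set String × List String), x ∈ st.1 → x ∈ (pvRun st l).1 := by
  intro l
  induction l with
  | nil => intro st h; exact h
  | cons c l ih => intro st h; exact ih (pvEmit st c) (pvEmit_mem_fst (Or.inl h))

theorem pvRun_mem {x : String} :
    ∀ (l : List String) (st : PySem.Set String × List String), x ∈ l → x ∈ (pvRun st l).1 := by
  intro l
  induction l with
  | nil => intro st h; cases h
  | cons c l ih =>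
      intro st h
      rcases List.mem_cons.1 h with rfl | h
      · exact pvRun_mono l _ (pvEmit_mem_fst (Or.inr rfl))
      · exact ih _ h

theorem pvRun_drop_last {st : PySem.Set String × List String} {c : String}
    (l : List String) (h : c ∈ st.1) : pvRun st (l ++ [c]) = pvRun st l := by
  rw [pvRun_append]
  show pvEmit (pvRun st l) c = pvRun st l
  exact pvEmit_of_mem (pvRun_mono l st h)

theorem pvRun_skip (row : Nat → List String) (f : Nat → String) :
    ∀ (I : List Nat) (st : PySem.Set String × List String), (∀ i ∈ I, f i ∈ st.1) →
      pvRun st (I.flatMap (fun i => row i ++ [f i])) = pvRun st (I.flatMap row) := by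
  intro I
  induction I with
  | nil => intro st _; rfl
  | cons i I ih =>
      intro st h
      rw [List.flatMap_cons, List.flatMap_cons]
      calc pvRun st ((row i ++ [f i]) ++ List.flatMap (fun i => row i ++ [f i]) I)
          = pvRun (pvRun st (row i ++ [f i])) (List.flatMap (fun i => row i ++ [f i]) I) :=
            pvRun_append ..
        _ = pvRun (pvRun st (row i)) (List.flatMap (fun i => row i ++ [f i]) I) := by
            rw [pvRun_drop_last _ (h i (List.mem_cons_self ..))]
        _ = pvRun (pvRun st (row i)) (List.flatMap row I) :=
            ih _ (fun j hj => pvRun_mono (row i) st (h j (List.mem_cons_of_mem _ hj)))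
        _ = pvRun st (row i ++ List.flatMap row I) := (pvRun_append ..).symm

theorem pvFlatCongr {α β : Type} (l : List α) (f h : α → List β) (H : ∀ x ∈ l, f x = h x) :
    l.flatMap f = l.flatMap h := by
  induction l with
  | nil => rfl
  | cons x xs ih =>
      rw [List.flatMap_cons, List.flatMap_cons, H x (List.mem_cons_self ..),
        ih (fun y hy => H y (List.mem_cons_of_mem _ hy))]

theorem pvFlatSingleton {α β : Type} (l : List α) (f : α → β) :
    l.flatMap (fun x => [f x]) = l.map f := by
  induction l with
  | nil => rfl
  | cons x xs ih => simp [List.flatMap_cons, ih]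

theorem pvRangeConcat (a b : Nat) : List.range' a (b + 1) = List.range' a b ++ [a + b] := by
  have := List.range'_concat (s := a) (n := b) (step := 1); simpa using this

theorem pvFlatLast (f : Nat → List String) (n : Nat) :
    ∀ (b a : Nat), a + b = n →
      (List.range' a (b + 1)).flatMap (fun e => if e = n then f e else []) = f n := by
  intro b
  induction b with
  | zero => intro a ha; subst ha; simp
  | succ b ih =>
      intro a ha
      rw [List.range'_succ, List.flatMap_cons, if_neg (by omega)]
      simpa using ih (a + 1) (by omega)

theorem pvHelperA_unfold (parts : List String) (gl s : Nat) (acc : List String) :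
    pvHelperA parts gl s acc =
      if s = parts.length then [PySem.Str.join "/" acc]
      else
        match gl with
        | 0 => ([] : List String)
        | g + 1 =>
          (List.range' (s + 1) (parts.length - s)).flatMap
            (fun e => pvHelperA parts g e (acc ++ [PySem.Str.join "_" ((parts.drop s).take (e - s))])) := by
  rw [pvHelperA.eq_def]

theorem pvHelperA_len (parts : List String) (gl : Nat) (acc : List String) :
    pvHelperA parts gl parts.length acc = [pvJ acc] := by
  rw [pvHelperA_unfold, if_pos rfl]; rfl

theorem pvHelperA_zero (parts : List String) (s : Nat) (acc : List String) :
    pvHelperA parts 0 s acc = if s = parts.length then [pvJ acc] else [] := by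
  rw [pvHelperA_unfold]; split <;> rfl

theorem pvTakeDrop {alpha : Type} (l : List alpha) (j : Nat) :
    (l.drop j).take (l.length - j) = l.drop j := by
  rw [← List.length_drop, List.take_length]

theorem pvHelperA_one (parts : List String) (s : Nat) (acc : List String)
    (h : s < parts.length) :
    pvHelperA parts 1 s acc = [pvJ (acc ++ [pvG parts s parts.length])] := by
  rw [pvHelperA_unfold, if_neg (by omega)]
  show (List.range' (s + 1) (parts.length - s)).flatMap
      (fun e => pvHelperA parts 0 e (acc ++ [PySem.Str.join "_" ((parts.drop s).take (e - s))])) = _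
  rw [pvFlatCongr _ _ (fun e => if e = parts.length then [pvJ (acc ++ [pvG parts s e])] else [])
    (fun e _ => by rw [pvHelperA_zero]; rfl)]
  have hb : parts.length - s = (parts.length - s - 1) + 1 := by omega
  rw [hb, pvFlatLast _ parts.length (parts.length - s - 1) (s + 1) (by omega)]

theorem pvHelperA_two (parts : List String) (s : Nat) (acc : List String)
    (h : s < parts.length) :
    pvHelperA parts 2 s acc =
      (List.range' (s + 1) (parts.length - (s + 1))).map
        (fun e => pvJ (acc ++ [pvG parts s e, pvG parts e parts.length]))
      ++ [pvJ (acc ++ [pvG parts s parts.length])] := by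
  rw [pvHelperA_unfold, if_neg (by omega)]
  show (List.range' (s + 1) (parts.length - s)).flatMap
      (fun e => pvHelperA parts 1 e (acc ++ [PySem.Str.join "_" ((parts.drop s).take (e - s))])) = _
  have hb : parts.length - s = (parts.length - (s + 1)) + 1 := by omega
  rw [hb, pvRangeConcat]
  have hlast : s + 1 + (parts.length - (s + 1)) = parts.length := by omega
  rw [hlast, List.flatMap_append]
  rw [pvFlatCongr _ _ (fun e => [pvJ (acc ++ [pvG parts s e, pvG parts e parts.length])])
    (fun e he => by
      have he' := List.mem_range'_1.1 he
      rw [pvHelperA_one parts e _ (by omega)]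
      show [pvJ ((acc ++ [pvG parts s e]) ++ [pvG parts e parts.length])] = _
      rw [List.append_assoc]; rfl)]
  rw [pvFlatSingleton]
  simp only [List.flatMap_cons, List.flatMap_nil, List.append_nil]
  rw [pvHelperA_len]
  rfl

theorem pvHelperA_three (parts : List String) (h : 0 < parts.length) :
    pvHelperA parts 3 0 [] =
      (List.range' 1 (parts.length - 1)).flatMap (fun i =>
        (List.range' (i + 1) (parts.length - (i + 1))).map
          (fun j => pvJ [pvG parts 0 i, pvG parts i j, pvG parts j parts.length])
        ++ [pvJ [pvG parts 0 i, pvG parts i parts.length]])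
      ++ [pvJ [pvG parts 0 parts.length]] := by
  rw [pvHelperA_unfold, if_neg (by omega)]
  show (List.range' 1 (parts.length - 0)).flatMap
      (fun e => pvHelperA parts 2 e ([] ++ [PySem.Str.join "_" ((parts.drop 0).take (e - 0))])) = _
  have hb : parts.length - 0 = (parts.length - 1) + 1 := by omega
  rw [hb, pvRangeConcat]
  have hlast : 1 + (parts.length - 1) = parts.length := by omega
  rw [hlast, List.flatMap_append]
  rw [pvFlatCongr _ _ (fun i =>
      (List.range' (i + 1) (parts.length - (i + 1))).map
        (fun j => pvJ [pvG parts 0 i, pvG parts i j, pvG parts j parts.length])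
      ++ [pvJ [pvG parts 0 i, pvG parts i parts.length]])
    (fun i hi => by
      have hi' := List.mem_range'_1.1 hi
      rw [pvHelperA_two parts i _ (by omega)]
      show (List.range' (i + 1) (parts.length - (i + 1))).map
          (fun e => pvJ (([] ++ [pvG parts 0 i]) ++ [pvG parts i e, pvG parts e parts.length])) ++ _ = _
      simp [pvG])]
  simp only [List.flatMap_cons, List.flatMap_nil, List.append_nil]
  rw [pvHelperA_len]
  rfl

theorem pvA_run (parts : List String) :
    iter_group_paths parts =
      (pvRun pvInit ([1, 2, 3].flatMap (fun k => pvHelperA parts k 0 []))).2 := rfl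

theorem pvB_run (parts : List String) :
    iter_group_paths_alt parts =
      (pvRun pvInit
        (([[parts]]
          ++ (List.range' 1 (parts.length - 1)).map (fun i => [parts.take i, parts.drop i])
          ++ (List.range' 1 (parts.length - 1)).flatMap (fun i =>
               (List.range' (i + 1) (parts.length - (i + 1))).map
                 (fun j => [parts.take i, (parts.drop i).take (j - i), parts.drop j]))).map
          (fun gs => PySem.Str.join "/" (gs.map (fun g => PySem.Str.join "_" g))))).2 := by
  unfold iter_group_paths_alt pvRun pvInit
  rw [List.foldl_map]
  rfl

-- dropping the duplicate emissions (A's re-emitted 1- and 2-group candidates) from the run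
theorem pvAssemble (F : String) (c2 : Nat → String) (c3 : Nat → Nat → String)
    (I : List Nat) (R : Nat → List Nat) :
    pvRun pvInit ([F] ++ ((I.map c2 ++ [F]) ++ (I.flatMap (fun i => (R i).map (c3 i) ++ [c2 i]) ++ [F])))
      = pvRun pvInit ([F] ++ I.map c2 ++ I.flatMap (fun i => (R i).map (c3 i))) := by
  have hF1 : F ∈ (pvRun pvInit [F]).1 := pvRun_mem [F] pvInit (List.mem_singleton.2 rfl)
  have hF2 : F ∈ (pvRun (pvRun pvInit [F]) (I.map c2)).1 := pvRun_mono _ _ hF1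
  have hc2mem : ∀ i ∈ I, c2 i ∈ (pvRun (pvRun pvInit [F]) (I.map c2)).1 := fun i hi =>
    pvRun_mem _ _ (List.mem_map.2 ⟨i, hi, rfl⟩)
  calc pvRun pvInit ([F] ++ ((I.map c2 ++ [F]) ++ (I.flatMap (fun i => (R i).map (c3 i) ++ [c2 i]) ++ [F])))
      = pvRun (pvRun (pvRun pvInit [F]) (I.map c2 ++ [F]))
          (I.flatMap (fun i => (R i).map (c3 i) ++ [c2 i]) ++ [F]) := by
        rw [pvRun_append, pvRun_append]
    _ = pvRun (pvRun (pvRun pvInit [F]) (I.map c2))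
          (I.flatMap (fun i => (R i).map (c3 i) ++ [c2 i]) ++ [F]) := by
        rw [pvRun_drop_last _ hF1]
    _ = pvRun (pvRun (pvRun pvInit [F]) (I.map c2))
          (I.flatMap (fun i => (R i).map (c3 i) ++ [c2 i])) := pvRun_drop_last _ hF2
    _ = pvRun (pvRun (pvRun pvInit [F]) (I.map c2)) (I.flatMap (fun i => (R i).map (c3 i))) :=
        pvRun_skip (fun i => (R i).map (c3 i)) c2 I _ hc2mem
    _ = pvRun pvInit ([F] ++ I.map c2 ++ I.flatMap (fun i => (R i).map (c3 i))) := by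
        rw [pvRun_append, pvRun_append]

set_option maxHeartbeats 1000000 in
theorem pv_main (parts : List String) : iter_group_paths parts = iter_group_paths_alt parts := by
  rcases parts with _ | ⟨p, ps⟩
  · decide
  · set parts := p :: ps with hparts
    have hlen : 0 < parts.length := by simp [hparts]
    rw [pvA_run, pvB_run]
    have hA : ([1, 2, 3].flatMap (fun k => pvHelperA parts k 0 [])) =
        [pvJ [pvG parts 0 parts.length]]
        ++ (((List.range' 1 (parts.length - 1)).map
              (fun i => pvJ [pvG parts 0 i, pvG parts i parts.length])
            ++ [pvJ [pvG parts 0 parts.length]])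
          ++ ((List.range' 1 (parts.length - 1)).flatMap (fun i =>
                (List.range' (i + 1) (parts.length - (i + 1))).map
                  (fun j => pvJ [pvG parts 0 i, pvG parts i j, pvG parts j parts.length])
                ++ [pvJ [pvG parts 0 i, pvG parts i parts.length]])
              ++ [pvJ [pvG parts 0 parts.length]])) := by
      rw [show ([1, 2, 3].flatMap (fun k => pvHelperA parts k 0 [])) =
          pvHelperA parts 1 0 [] ++ (pvHelperA parts 2 0 [] ++ pvHelperA parts 3 0 []) from by simp]
      rw [pvHelperA_one parts 0 [] hlen, pvHelperA_two parts 0 [] hlen, pvHelperA_three parts hlen]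
      simp
    have hB :
        (([[parts]]
          ++ (List.range' 1 (parts.length - 1)).map (fun i => [parts.take i, parts.drop i])
          ++ (List.range' 1 (parts.length - 1)).flatMap (fun i =>
               (List.range' (i + 1) (parts.length - (i + 1))).map
                 (fun j => [parts.take i, (parts.drop i).take (j - i), parts.drop j]))).map
          (fun gs => PySem.Str.join "/" (gs.map (fun g => PySem.Str.join "_" g))))
        = [pvJ [pvG parts 0 parts.length]]
          ++ (List.range' 1 (parts.length - 1)).map
               (fun i => pvJ [pvG parts 0 i, pvG parts i parts.length])
          ++ (List.range' 1 (parts.length - 1)).flatMap (fun i =>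
               (List.range' (i + 1) (parts.length - (i + 1))).map
                 (fun j => pvJ [pvG parts 0 i, pvG parts i j, pvG parts j parts.length])) := by
      rw [List.map_append, List.map_append, List.map_map, List.map_flatMap]
      congr 1
      · congr 1
        · simp [pvJ, pvG]
        · apply List.map_congr_left
          intro i _
          simp [pvJ, pvG, pvTakeDrop, Function.comp]
      · apply pvFlatCongr
        intro i _
        rw [List.map_map]
        apply List.map_congr_left
        intro j _
        simp [pvJ, pvG, pvTakeDrop, Function.comp]
    rw [hA, hB, pvAssemble]

-- ===== VERDICT (by name: the statement is the Claim_ definition above) =====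
theorem iter_group_paths_spec : Claim_equal_iter_group_paths := by
  intro parts _
  unfold Spec_iter_group_paths
  exact pv_main parts
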